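-- pv_equiv track=rewrite | github.com/SUTHARSAN-V/Question-1 | question_2.py | count_bees_between_flowers
-- ===== SOURCE A (Python) =====
-- def count_bees_between_flowers(s, startIndex, endIndex):
--     n = len(s)
--     nearest_left_flower = [-1] * n
--     nearest_right_flower = [-1] * n
--
--     last_flower = -1
--     for i in range(n):
--         if s[i] == '|':
--             last_flower = i
--         nearest_left_flower[i] = last_flower
--
--     last_flower = -1
--     for i in range(n - 1, -1, -1):
--         if s[i] == '|':
--             last_flower = i
--         nearest_right_flower[i] = last_flower
--
--     prefix_bees = [0] * (n + 1)
--     for i in range(n):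
--         prefix_bees[i + 1] = prefix_bees[i] + (1 if s[i] == '*' else 0)
--
--     results = []
--     for i in range(len(startIndex)):
--         start = startIndex[i] - 1
--         end = endIndex[i] - 1
--         right_flower = nearest_right_flower[start]
--         left_flower = nearest_left_flower[end]
--
--         if right_flower != -1 and left_flower != -1 and right_flower <= left_flower:
--             bees_between = prefix_bees[left_flower + 1] - prefix_bees[right_flower + 1]
--             results.append(bees_between)
--         else:
--             results.append(0)
--
--     return results
-- ===== SOURCE B (Python) =====
-- def count_bees_between_flowers(s, startIndex, endIndex):
--     # bees_upto_last_flower[i]: bees strictly before the last flower at or before i (0 if none)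
--     bees_upto_last_flower = []
--     seen = 0
--     run = 0
--     for c in s:
--         if c == '|':
--             run = seen
--         if c == '*':
--             seen += 1
--         bees_upto_last_flower.append(run)
--     total = seen
--     # bees_before_next_flower[i]: bees strictly before the first flower at or after i (total if none)
--     rev = []
--     after = 0
--     cur = total
--     for c in reversed(s):
--         if c == '|':
--             cur = total - after
--         rev.append(cur)
--         if c == '*':
--             after += 1
--     bees_before_next_flower = rev[::-1]
--     results = []
--     for i in range(len(startIndex)):
--         end = endIndex[i] - 1
--         start = startIndex[i] - 1
--         results.append(max(0, bees_upto_last_flower[end] - bees_before_next_flower[start]))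
--     return results
-- ===== Notes on version B (the rewrite author's own statement) =====
-- stated objective: alternative
-- what changed: B stores bee counts directly in two fused scans (bees up to the last flower at-or-before i, bees before the first flower at-or-after i) and answers each query with one clamped difference max(0, left[end]-right[start]), eliminating A's two nearest-flower position tables, its separate prefix array and its three-way sentinel guard.
import Mathlib
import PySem

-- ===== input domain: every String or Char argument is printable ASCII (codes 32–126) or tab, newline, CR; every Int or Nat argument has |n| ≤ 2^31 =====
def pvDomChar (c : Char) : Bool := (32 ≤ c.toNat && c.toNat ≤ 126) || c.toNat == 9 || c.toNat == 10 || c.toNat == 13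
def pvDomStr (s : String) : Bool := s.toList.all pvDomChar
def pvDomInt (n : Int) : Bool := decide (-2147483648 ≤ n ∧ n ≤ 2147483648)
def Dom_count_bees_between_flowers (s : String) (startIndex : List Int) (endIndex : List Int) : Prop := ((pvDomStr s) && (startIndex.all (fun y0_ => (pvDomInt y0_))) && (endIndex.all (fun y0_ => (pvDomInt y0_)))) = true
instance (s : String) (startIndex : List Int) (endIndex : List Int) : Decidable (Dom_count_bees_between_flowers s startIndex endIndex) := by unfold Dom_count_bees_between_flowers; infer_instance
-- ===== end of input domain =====

-- B replaces A's nearest-flower position tables, prefix array and sentinel guard with two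
-- fused bee-count scans and one clamped difference per query (objective: alternative).

-- ===== PORT A =====
-- first loop: nearest_left_flower, carrying last_flower
def pvBuildLeft : List Char → Int → Int → List Int
  | [], _, _ => []
  | c :: rest, i, last =>
    let l := if c = '|' then i else last
    l :: pvBuildLeft rest (i + 1) l

-- second loop (backwards over the string): nearest_right_flower; the value written at i is
-- i itself on a '|' and otherwise the last_flower coming from the right (head of the suffix result, -1 if none)
def pvBuildRight : List Char → Int → List Int
  | [], _ => []
  | c :: rest, i =>
    let r := pvBuildRight rest (i + 1)
    (if c = '|' then i else r.headD (-1)) :: r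

-- third loop: prefix_bees
def pvBuildPrefix : List Char → Int → List Int
  | [], acc => [acc]
  | c :: rest, acc => acc :: pvBuildPrefix rest (acc + (if c = '*' then 1 else 0))

-- results loop; A raises IndexError when endIndex is exhausted (outside Pre_), modelled by []
def pvLoopA (nlf nrf pref : List Int) : List Int → List Int → List Int
  | [], _ => []
  | _ :: _, [] => []
  | st :: sts, en :: ens =>
    let start := st - 1
    let e := en - 1
    let rf := (PySem.List.pyGet? nrf start).getD 0
    let lf := (PySem.List.pyGet? nlf e).getD 0
    (if rf ≠ -1 ∧ lf ≠ -1 ∧ rf ≤ lf then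
        (PySem.List.pyGet? pref (lf + 1)).getD 0 - (PySem.List.pyGet? pref (rf + 1)).getD 0
      else 0) :: pvLoopA nlf nrf pref sts ens

def count_bees_between_flowers (s : String) (startIndex : List Int) (endIndex : List Int) : List Int :=
  let cs := s.toList
  pvLoopA (pvBuildLeft cs 0 (-1)) (pvBuildRight cs 0) (pvBuildPrefix cs 0) startIndex endIndex

-- ===== PORT B =====
-- left scan: emits 'run' (bees seen strictly before the last flower so far), carries 'seen';
-- second component is the final 'seen' (the total number of bees)
def pvBeesLeft : List Char → Int → Int → (List Int × Int)
  | [], seen, _ => ([], seen)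
  | c :: rest, seen, run =>
    let run' := if c = '|' then seen else run
    let seen' := if c = '*' then seen + 1 else seen
    let p := pvBeesLeft rest seen' run'
    (run' :: p.1, p.2)

-- reversed scan carrying (cur, after); the value at i is total - after on a '|' and otherwise the
-- cur coming from the right (head of the suffix result, total if none); second component is 'after'
def pvBeesRight (total : Int) : List Char → (List Int × Int)
  | [] => ([], 0)
  | c :: rest =>
    let p := pvBeesRight total rest
    let cur := if c = '|' then total - p.2 else p.1.headD total
    (cur :: p.1, p.2 + (if c = '*' then 1 else 0))

-- results loop; B raises IndexError when endIndex is exhausted (outside Pre_), modelled by []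
def pvLoopB (bl br : List Int) : List Int → List Int → List Int
  | [], _ => []
  | _ :: _, [] => []
  | st :: sts, en :: ens =>
    max 0 ((PySem.List.pyGet? bl (en - 1)).getD 0 - (PySem.List.pyGet? br (st - 1)).getD 0)
      :: pvLoopB bl br sts ens

def count_bees_between_flowers_alt (s : String) (startIndex : List Int) (endIndex : List Int) : List Int :=
  let cs := s.toList
  let lp := pvBeesLeft cs 0 0
  let br := (pvBeesRight lp.2 cs).1
  pvLoopB lp.1 br startIndex endIndex

-- ===== PRECONDITION & SPEC =====
-- Pre_ excludes exactly the inputs on which A raises IndexError: startIndex longer than endIndex,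
-- or a converted query index outside Python's accepted range [-n, n-1].
def Pre_count_bees_between_flowers (s : String) (startIndex : List Int) (endIndex : List Int) : Prop :=
  startIndex.length ≤ endIndex.length ∧
  ∀ q ∈ startIndex.zip endIndex,
    1 - (s.toList.length : Int) ≤ q.1 ∧ q.1 ≤ (s.toList.length : Int) ∧
    1 - (s.toList.length : Int) ≤ q.2 ∧ q.2 ≤ (s.toList.length : Int)
instance (s : String) (startIndex : List Int) (endIndex : List Int) : Decidable (Pre_count_bees_between_flowers s startIndex endIndex) := by unfold Pre_count_bees_between_flowers; infer_instance

def pvWitness_count_bees_between_flowers : String × List Int × List Int := ("*|**|*", [2], [6])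

def Spec_count_bees_between_flowers (s : String) (startIndex : List Int) (endIndex : List Int) (out : List Int) : Prop := out = count_bees_between_flowers_alt s startIndex endIndex
instance (s : String) (startIndex : List Int) (endIndex : List Int) (out : List Int) : Decidable (Spec_count_bees_between_flowers s startIndex endIndex out) := by unfold Spec_count_bees_between_flowers; infer_instance

-- ===== CLAIM (what is proved, stated in full; the proofs are below) =====
def Claim_equal_count_bees_between_flowers : Prop := ∀ (s : String) (startIndex : List Int) (endIndex : List Int), Dom_count_bees_between_flowers s startIndex endIndex → Pre_count_bees_between_flowers s startIndex endIndex → Spec_count_bees_between_flowers s startIndex endIndex (count_bees_between_flowers s startIndex endIndex)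

-- ===== LEMMAS AND PROOFS =====

-- flower positions of the string, used only by the proofs to characterise both ports' arrays
def pvFlowers : List Char → Int → List Int
  | [], _ => []
  | c :: rest, i => if c = '|' then i :: pvFlowers rest (i + 1) else pvFlowers rest (i + 1)

-- bees among the first m characters / among all characters, used only by the proofs
def pvCount (cs : List Char) (m : Nat) : Int := ((cs.take m).countP (fun c => decide (c = '*')) : Int)

def pvStars (cs : List Char) : Int := (cs.countP (fun c => decide (c = '*')) : Int)

theorem pvBuildRight_length (cs : List Char) (b : Int) :
    (pvBuildRight cs b).length = cs.length := by
  induction cs generalizing b with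
  | nil => rfl
  | cons c rest ih => simp [pvBuildRight, ih]

theorem pvBuildLeft_length (cs : List Char) (b last : Int) :
    (pvBuildLeft cs b last).length = cs.length := by
  induction cs generalizing b last with
  | nil => rfl
  | cons c rest ih => simp [pvBuildLeft, ih]

theorem pvBeesLeft_length (cs : List Char) (seen run : Int) :
    (pvBeesLeft cs seen run).1.length = cs.length := by
  induction cs generalizing seen run with
  | nil => rfl
  | cons c rest ih => simp [pvBeesLeft, ih]

theorem pvBeesRight_length (total : Int) (cs : List Char) :
    (pvBeesRight total cs).1.length = cs.length := by
  induction cs with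
  | nil => rfl
  | cons c rest ih => simp [pvBeesRight, ih]

theorem pvFlowers_ge (cs : List Char) (b p : Int) (hp : p ∈ pvFlowers cs b) : b ≤ p := by
  induction cs generalizing b with
  | nil => simp [pvFlowers] at hp
  | cons c rest ih =>
    simp only [pvFlowers] at hp
    split at hp
    · rcases List.mem_cons.mp hp with h | h
      · omega
      · have := ih (b + 1) h; omega
    · have := ih (b + 1) hp; omega

theorem pvFlowers_lt (cs : List Char) (b p : Int) (hp : p ∈ pvFlowers cs b) :
    p < b + cs.length := by
  induction cs generalizing b with
  | nil => simp [pvFlowers] at hp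
  | cons c rest ih =>
    simp only [pvFlowers] at hp
    simp only [List.length_cons]
    split at hp
    · rcases List.mem_cons.mp hp with h | h
      · subst h; push_cast; omega
      · have := ih (b + 1) h; push_cast at this ⊢; omega
    · have := ih (b + 1) hp; push_cast at this ⊢; omega

theorem pvFlowers_filter_le_nil (cs : List Char) (b m : Int) (h : m < b) :
    (pvFlowers cs b).filter (fun p => decide (p ≤ m)) = [] := by
  rw [List.filter_eq_nil_iff]
  intro p hp
  have := pvFlowers_ge cs b p hp
  simp; omega

theorem pvFlowers_filter_ge_all (cs : List Char) (b m : Int) (h : m ≤ b) :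
    (pvFlowers cs b).filter (fun p => decide (m ≤ p)) = pvFlowers cs b := by
  rw [List.filter_eq_self]
  intro p hp
  have := pvFlowers_ge cs b p hp
  simp; omega

-- A's nearest_right list and the flower list begin with the same position
theorem pvBuildRight_head (cs : List Char) (b : Int) :
    (pvBuildRight cs b).head?.getD (-1) = (pvFlowers cs b).head?.getD (-1) := by
  induction cs generalizing b with
  | nil => rfl
  | cons c rest ih =>
    by_cases hc : c = '|' <;> simp [pvBuildRight, pvFlowers, hc, ih]

-- entry k of nearest_left_flower = last flower position ≤ b + k (default: incoming last_flower)
theorem pvBuildLeft_getElem (cs : List Char) (b last : Int) (k : Nat) (hk : k < cs.length)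
    (m : Int) (hm : m = b + k) :
    (pvBuildLeft cs b last)[k]? =
      some (((pvFlowers cs b).filter (fun p => decide (p ≤ m))).getLast?.getD last) := by
  induction cs generalizing b last k m with
  | nil => simp at hk
  | cons c rest ih =>
    cases k with
    | zero =>
      have hm' : m = b := by push_cast at hm; omega
      subst hm'
      have hnil := pvFlowers_filter_le_nil rest (m + 1) m (by omega)
      by_cases hc : c = '|'
      · have step : (pvFlowers (c :: rest) m).filter (fun p => decide (p ≤ m)) = [m] := by
          simp [pvFlowers, hc, hnil]
        rw [step]
        simp [pvBuildLeft, hc]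
      · have step : (pvFlowers (c :: rest) m).filter (fun p => decide (p ≤ m)) = [] := by
          simp [pvFlowers, hc, hnil]
        rw [step]
        simp [pvBuildLeft, hc]
    | succ k =>
      have hk' : k < rest.length := by simpa using hk
      by_cases hc : c = '|'
      · have ih' := ih (b + 1) b k hk' m (by push_cast at hm ⊢; omega)
        have hb : decide (b ≤ m) = true := by simp; omega
        have step : (pvFlowers (c :: rest) b).filter (fun p => decide (p ≤ m)) =
            b :: (pvFlowers rest (b + 1)).filter (fun p => decide (p ≤ m)) := by
          simp [pvFlowers, hc, List.filter_cons, hb]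
        rw [step, ← List.getLastD_eq_getLast?, List.getLastD_cons, List.getLastD_eq_getLast?]
        simpa [pvBuildLeft, hc] using ih'
      · have ih' := ih (b + 1) last k hk' m (by push_cast at hm ⊢; omega)
        simpa [pvBuildLeft, pvFlowers, hc] using ih'

-- entry k of nearest_right_flower = first flower position ≥ b + k (default -1)
theorem pvBuildRight_getElem (cs : List Char) (b : Int) (k : Nat) (hk : k < cs.length)
    (m : Int) (hm : m = b + k) :
    (pvBuildRight cs b)[k]? =
      some (((pvFlowers cs b).filter (fun p => decide (m ≤ p))).head?.getD (-1)) := by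
  induction cs generalizing b k m with
  | nil => simp at hk
  | cons c rest ih =>
    cases k with
    | zero =>
      have hm' : m = b := by push_cast at hm; omega
      subst hm'
      by_cases hc : c = '|'
      · simp [pvBuildRight, pvFlowers, hc]
      · have hall := pvFlowers_filter_ge_all rest (m + 1) m (by omega)
        have h1 : pvFlowers (c :: rest) m = pvFlowers rest (m + 1) := by simp [pvFlowers, hc]
        rw [h1, hall]
        simpa [pvBuildRight, hc] using pvBuildRight_head rest (m + 1)
    | succ k =>
      have hk' : k < rest.length := by simpa using hk
      have ih' := ih (b + 1) k hk' m (by push_cast at hm ⊢; omega)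
      by_cases hc : c = '|'
      · have hb : decide (m ≤ b) = false := by simp; push_cast at hm; omega
        have step : (pvFlowers (c :: rest) b).filter (fun p => decide (m ≤ p)) =
            (pvFlowers rest (b + 1)).filter (fun p => decide (m ≤ p)) := by
          simp [pvFlowers, hc, List.filter_cons, hb]
        rw [step]
        simpa [pvBuildRight, hc] using ih'
      · rw [show (pvFlowers (c :: rest) b) = pvFlowers rest (b + 1) by simp [pvFlowers, hc]]
        simpa [pvBuildRight, hc] using ih'

theorem pvCount_nonneg (cs : List Char) (m : Nat) : 0 ≤ pvCount cs m := by
  simp [pvCount]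

theorem pvStars_nonneg (cs : List Char) : 0 ≤ pvStars cs := by
  simp [pvStars]

theorem pvCount_mono (cs : List Char) (m m' : Nat) (h : m ≤ m') :
    pvCount cs m ≤ pvCount cs m' := by
  have hsub : List.Sublist (cs.take m) (cs.take m') := by
    rw [show cs.take m = (cs.take m').take m by rw [List.take_take, min_eq_left h]]
    exact List.take_sublist _ _
  simp only [pvCount]
  exact_mod_cast hsub.countP_le

theorem pvCount_le_stars (cs : List Char) (m : Nat) : pvCount cs m ≤ pvStars cs := by
  simp only [pvCount, pvStars]
  exact_mod_cast (List.take_sublist m cs).countP_le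

theorem pvCount_succ (c : Char) (rest : List Char) (j : Nat) :
    pvCount (c :: rest) (j + 1) = (if c = '*' then 1 else 0) + pvCount rest j := by
  simp only [pvCount, List.take_succ_cons, List.countP_cons]
  by_cases hc : c = '*' <;> simp [hc] <;> push_cast <;> ring

theorem pvStars_cons (c : Char) (rest : List Char) :
    pvStars (c :: rest) = (if c = '*' then 1 else 0) + pvStars rest := by
  simp only [pvStars, List.countP_cons]
  by_cases hc : c = '*' <;> simp [hc] <;> push_cast <;> ring

-- entry j of prefix_bees = acc + bees among the first j characters
theorem pvBuildPrefix_getElem (cs : List Char) (acc : Int) (j : Nat) (hj : j ≤ cs.length) :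
    (pvBuildPrefix cs acc)[j]? = some (acc + pvCount cs j) := by
  induction cs generalizing acc j with
  | nil =>
    have hj0 : j = 0 := by simpa using hj
    subst hj0
    simp [pvBuildPrefix, pvCount]
  | cons c rest ih =>
    cases j with
    | zero => simp [pvBuildPrefix, pvCount]
    | succ j =>
      have hj' : j ≤ rest.length := by simpa using hj
      rw [show (pvBuildPrefix (c :: rest) acc)[j + 1]? =
            (pvBuildPrefix rest (acc + (if c = '*' then 1 else 0)))[j]? by simp [pvBuildPrefix]]
      rw [ih _ j hj', pvCount_succ]
      congr 1
      ring

theorem pvBeesLeft_snd (cs : List Char) (seen run : Int) :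
    (pvBeesLeft cs seen run).2 = seen + pvStars cs := by
  induction cs generalizing seen run with
  | nil => simp [pvBeesLeft, pvStars]
  | cons c rest ih =>
    simp only [pvBeesLeft, ih, pvStars_cons]
    by_cases hc : c = '*' <;> simp [hc] <;> ring

theorem pvBeesRight_snd (total : Int) (cs : List Char) :
    (pvBeesRight total cs).2 = pvStars cs := by
  induction cs with
  | nil => simp [pvBeesRight, pvStars]
  | cons c rest ih =>
    simp only [pvBeesRight, ih, pvStars_cons]
    by_cases hc : c = '*' <;> simp [hc] <;> ring

-- B's right list and the flower list begin together
theorem pvBeesRight_head (total : Int) (cs : List Char) (b : Int) :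
    (pvBeesRight total cs).1.head?.getD total =
      ((pvFlowers cs b).head?).elim total
        (fun f => total - pvStars cs + pvCount cs (f + 1 - b).toNat) := by
  induction cs generalizing b with
  | nil => rfl
  | cons c rest ih =>
    by_cases hc : c = '|'
    · subst hc
      have h1 : pvCount ('|' :: rest) 1 = 0 := by
        rw [pvCount_succ]; simp [pvCount]
      have h2 := pvBeesRight_snd total rest
      have h3 := pvStars_cons '|' rest
      simp only [pvBeesRight, pvFlowers, if_pos rfl, List.head?_cons, Option.elim,
        Option.getD_some, show (b + 1 - b).toNat = 1 from by omega, h1, h2, h3]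
      simp
      omega
    · simp only [pvBeesRight, pvFlowers, hc, if_false]
      have := ih (b + 1)
      cases hf : (pvFlowers rest (b + 1)).head? with
      | none => simp [hf] at this ⊢; simpa using this
      | some f =>
        have hfm : f ∈ pvFlowers rest (b + 1) :=
          List.mem_of_mem_head? (Option.mem_def.mpr hf)
        have hfb : b + 1 ≤ f := pvFlowers_ge rest (b + 1) f hfm
        rw [hf] at this
        simp only [Option.elim] at this ⊢
        rw [show (pvBeesRight total rest).1.headD total
              = (pvBeesRight total rest).1.head?.getD total by simp [List.headD_eq_head?_getD],
            this, show (f + 1 - b).toNat = (f + 1 - (b + 1)).toNat + 1 by omega,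
            pvCount_succ, pvStars_cons]
        simp [hc]
        ring

-- entry k of B's left list = bees strictly before the last flower ≤ b + k (run if none)
theorem pvBeesLeft_getElem (cs : List Char) (b seen run : Int) (k : Nat) (hk : k < cs.length)
    (m : Int) (hm : m = b + k) :
    (pvBeesLeft cs seen run).1[k]? =
      some ((((pvFlowers cs b).filter (fun p => decide (p ≤ m))).getLast?).elim run
        (fun f => seen + pvCount cs (f + 1 - b).toNat)) := by
  induction cs generalizing b seen run k m with
  | nil => simp at hk
  | cons c rest ih =>
    cases k with
    | zero =>
      have hm' : m = b := by push_cast at hm; omega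
      subst hm'
      have hnil := pvFlowers_filter_le_nil rest (m + 1) m (by omega)
      by_cases hc : c = '|'
      · subst hc
        have step : (pvFlowers ('|' :: rest) m).filter (fun p => decide (p ≤ m)) = [m] := by
          simp [pvFlowers, hnil]
        rw [step]
        have hcnt : pvCount ('|' :: rest) 1 = 0 := by
          rw [pvCount_succ]; simp [pvCount]
        simp [pvBeesLeft, hcnt, show (m + 1 - m).toNat = 1 from by omega]
      · have step : (pvFlowers (c :: rest) m).filter (fun p => decide (p ≤ m)) = [] := by
          simp [pvFlowers, hc, hnil]
        rw [step]
        simp [pvBeesLeft, hc]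
    | succ k =>
      have hk' : k < rest.length := by simpa using hk
      by_cases hc : c = '|'
      · subst hc
        have ih' := ih (b + 1) seen seen k hk' m (by push_cast at hm ⊢; omega)
        have hb : decide (b ≤ m) = true := by simp; omega
        have step : (pvFlowers ('|' :: rest) b).filter (fun p => decide (p ≤ m)) =
            b :: (pvFlowers rest (b + 1)).filter (fun p => decide (p ≤ m)) := by
          simp [pvFlowers, List.filter_cons, hb]
        rw [step]
        have hL : (pvBeesLeft ('|' :: rest) seen run).1[k + 1]? =
            (pvBeesLeft rest seen seen).1[k]? := by
          simp [pvBeesLeft]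
        rw [hL, ih']
        congr 1
        cases hf : ((pvFlowers rest (b + 1)).filter (fun p => decide (p ≤ m))).getLast? with
        | none =>
          have hnil : (pvFlowers rest (b + 1)).filter (fun p => decide (p ≤ m)) = [] :=
            List.getLast?_eq_none_iff.mp hf
          rw [hnil]
          have hcnt : pvCount ('|' :: rest) 1 = 0 := by
            rw [pvCount_succ]; simp [pvCount]
          simp [hcnt, show (b + 1 - b).toNat = 1 from by omega]
        | some f =>
          have hfm : f ∈ pvFlowers rest (b + 1) :=
            List.mem_of_mem_filter (List.mem_reverse.mp (List.mem_of_mem_head?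
              (Option.mem_def.mpr (by rw [List.head?_reverse]; exact hf))))
          have hfb : b + 1 ≤ f := pvFlowers_ge rest (b + 1) f hfm
          have hne : (pvFlowers rest (b + 1)).filter (fun p => decide (p ≤ m)) ≠ [] := by
            intro h0; rw [h0] at hf; simp at hf
          have hgl : (b :: (pvFlowers rest (b + 1)).filter (fun p => decide (p ≤ m))).getLast? =
              some f := by
            obtain ⟨y, ys, hys⟩ := List.exists_cons_of_ne_nil hne
            rw [hys, show (b :: y :: ys).getLast? = (y :: ys).getLast? from by simp, ← hys]
            exact hf
          rw [hgl]
          simp only [Option.elim]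
          rw [show (f + 1 - b).toNat = (f + 1 - (b + 1)).toNat + 1 by omega, pvCount_succ]
          simp
      · have ih' := ih (b + 1) (if c = '*' then seen + 1 else seen) run k hk' m
          (by push_cast at hm ⊢; omega)
        have hL : (pvBeesLeft (c :: rest) seen run).1[k + 1]? =
            (pvBeesLeft rest (if c = '*' then seen + 1 else seen) run).1[k]? := by
          simp [pvBeesLeft, hc]
        rw [hL, ih', show pvFlowers (c :: rest) b = pvFlowers rest (b + 1) by
          simp [pvFlowers, hc]]
        congr 1
        cases hf : ((pvFlowers rest (b + 1)).filter (fun p => decide (p ≤ m))).getLast? with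
        | none => simp
        | some f =>
          have hfm : f ∈ pvFlowers rest (b + 1) :=
            List.mem_of_mem_filter (List.mem_reverse.mp (List.mem_of_mem_head?
              (Option.mem_def.mpr (by rw [List.head?_reverse]; exact hf))))
          have hfb : b + 1 ≤ f := pvFlowers_ge rest (b + 1) f hfm
          simp only [Option.elim]
          rw [show (f + 1 - b).toNat = (f + 1 - (b + 1)).toNat + 1 by omega, pvCount_succ]
          by_cases hs : c = '*' <;> simp [hs] <;> ring
-- entry k of B's right list = bees strictly before the first flower ≥ b + k (total if none)
theorem pvBeesRight_getElem (total : Int) (cs : List Char) (b : Int) (k : Nat)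
    (hk : k < cs.length) (m : Int) (hm : m = b + k) :
    (pvBeesRight total cs).1[k]? =
      some ((((pvFlowers cs b).filter (fun p => decide (m ≤ p))).head?).elim total
        (fun f => total - pvStars cs + pvCount cs (f + 1 - b).toNat)) := by
  induction cs generalizing b k m with
  | nil => simp at hk
  | cons c rest ih =>
    cases k with
    | zero =>
      have hm' : m = b := by push_cast at hm; omega
      subst hm'
      by_cases hc : c = '|'
      · subst hc
        have step : (pvFlowers ('|' :: rest) m).filter (fun p => decide (m ≤ p)) =
            m :: (pvFlowers rest (m + 1)).filter (fun p => decide (m ≤ p)) := by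
          simp [pvFlowers, List.filter_cons]
        rw [step]
        have hcnt : pvCount ('|' :: rest) 1 = 0 := by
          rw [pvCount_succ]; simp [pvCount]
        have hR : (pvBeesRight total ('|' :: rest)).1[0]? =
            some (total - (pvBeesRight total rest).2) := by simp [pvBeesRight]
        rw [hR, pvBeesRight_snd, pvStars_cons]
        simp [hcnt, show (m + 1 - m).toNat = 1 from by omega]
      · have hall := pvFlowers_filter_ge_all rest (m + 1) m (by omega)
        have h1 : pvFlowers (c :: rest) m = pvFlowers rest (m + 1) := by simp [pvFlowers, hc]
        rw [h1, hall]
        have hR : (pvBeesRight total (c :: rest)).1[0]? =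
            some ((pvBeesRight total rest).1.headD total) := by simp [pvBeesRight, hc]
        rw [hR]
        have hh := pvBeesRight_head total rest (m + 1)
        rw [show (pvBeesRight total rest).1.headD total
              = (pvBeesRight total rest).1.head?.getD total by simp [List.headD_eq_head?_getD], hh]
        congr 1
        cases hf : (pvFlowers rest (m + 1)).head? with
        | none => simp
        | some f =>
          have hfm : f ∈ pvFlowers rest (m + 1) :=
            List.mem_of_mem_head? (Option.mem_def.mpr hf)
          have hfb : m + 1 ≤ f := pvFlowers_ge rest (m + 1) f hfm
          simp only [Option.elim]
          rw [show (f + 1 - m).toNat = (f + 1 - (m + 1)).toNat + 1 by omega, pvCount_succ,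
            pvStars_cons]
          by_cases hs : c = '*' <;> simp [hs] <;> ring
    | succ k =>
      have hk' : k < rest.length := by simpa using hk
      have ih' := ih (b + 1) k hk' m (by push_cast at hm ⊢; omega)
      have hR : (pvBeesRight total (c :: rest)).1[k + 1]? = (pvBeesRight total rest).1[k]? := by
        simp [pvBeesRight]
      by_cases hc : c = '|'
      · subst hc
        have hb : decide (m ≤ b) = false := by simp; push_cast at hm; omega
        have step : (pvFlowers ('|' :: rest) b).filter (fun p => decide (m ≤ p)) =
            (pvFlowers rest (b + 1)).filter (fun p => decide (m ≤ p)) := by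
          simp [pvFlowers, List.filter_cons, hb]
        rw [hR, ih', step]
        congr 1
        cases hf : ((pvFlowers rest (b + 1)).filter (fun p => decide (m ≤ p))).head? with
        | none => simp
        | some f =>
          have hfm : f ∈ pvFlowers rest (b + 1) :=
            List.mem_of_mem_filter (List.mem_of_mem_head? (Option.mem_def.mpr hf))
          have hfb : b + 1 ≤ f := pvFlowers_ge rest (b + 1) f hfm
          simp only [Option.elim]
          rw [show (f + 1 - b).toNat = (f + 1 - (b + 1)).toNat + 1 by omega, pvCount_succ,
            pvStars_cons]
          simp
      · rw [hR, ih', show pvFlowers (c :: rest) b = pvFlowers rest (b + 1) by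
          simp [pvFlowers, hc]]
        congr 1
        cases hf : ((pvFlowers rest (b + 1)).filter (fun p => decide (m ≤ p))).head? with
        | none => simp
        | some f =>
          have hfm : f ∈ pvFlowers rest (b + 1) :=
            List.mem_of_mem_filter (List.mem_of_mem_head? (Option.mem_def.mpr hf))
          have hfb : b + 1 ≤ f := pvFlowers_ge rest (b + 1) f hfm
          simp only [Option.elim]
          rw [show (f + 1 - b).toNat = (f + 1 - (b + 1)).toNat + 1 by omega, pvCount_succ,
            pvStars_cons]
          by_cases hs : c = '*' <;> simp [hs] <;> ring

-- one Python index in [-N, N-1] reads the same physical cell of every length-N list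
theorem pvGetIdx (i : Int) (N : Nat) (h1 : -(N : Int) ≤ i) (h2 : i < (N : Int)) :
    ∃ k : Nat, k < N ∧ ∀ (ys : List Int), ys.length = N → PySem.List.pyGet? ys i = ys[k]? := by
  by_cases h0 : 0 ≤ i
  · exact ⟨i.toNat, by omega, fun ys hy => PySem.List.pyGet?_of_nonneg ys h0⟩
  · obtain ⟨k0, hk0⟩ : ∃ k0 : Nat, i = -(k0 : Int) := ⟨(-i).toNat, by omega⟩
    subst hk0
    refine ⟨N - k0, by omega, fun ys hy => ?_⟩
    rw [PySem.List.pyGet?_neg_natCast ys k0 (by omega) (by omega), hy]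

-- one query: A's guarded prefix difference equals B's clamped difference
theorem pvQuery_eq (cs : List Char) (st en : Int)
    (h1 : 1 - (cs.length : Int) ≤ st) (h2 : st ≤ (cs.length : Int))
    (h3 : 1 - (cs.length : Int) ≤ en) (h4 : en ≤ (cs.length : Int)) :
    (if ((PySem.List.pyGet? (pvBuildRight cs 0) (st - 1)).getD 0 ≠ -1 ∧
         (PySem.List.pyGet? (pvBuildLeft cs 0 (-1)) (en - 1)).getD 0 ≠ -1 ∧
         (PySem.List.pyGet? (pvBuildRight cs 0) (st - 1)).getD 0 ≤
           (PySem.List.pyGet? (pvBuildLeft cs 0 (-1)) (en - 1)).getD 0) then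
       (PySem.List.pyGet? (pvBuildPrefix cs 0)
           ((PySem.List.pyGet? (pvBuildLeft cs 0 (-1)) (en - 1)).getD 0 + 1)).getD 0 -
       (PySem.List.pyGet? (pvBuildPrefix cs 0)
           ((PySem.List.pyGet? (pvBuildRight cs 0) (st - 1)).getD 0 + 1)).getD 0
     else 0) =
    max 0 ((PySem.List.pyGet? (pvBeesLeft cs 0 0).1 (en - 1)).getD 0 -
      (PySem.List.pyGet? (pvBeesRight (pvBeesLeft cs 0 0).2 cs).1 (st - 1)).getD 0) := by
  obtain ⟨k1, hk1, hg1⟩ := pvGetIdx (st - 1) cs.length (by omega) (by omega)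
  obtain ⟨k2, hk2, hg2⟩ := pvGetIdx (en - 1) cs.length (by omega) (by omega)
  have hT : (pvBeesLeft cs 0 0).2 = pvStars cs := by rw [pvBeesLeft_snd]; ring
  rw [hg1 _ (pvBuildRight_length cs 0), hg2 _ (pvBuildLeft_length cs 0 (-1)),
    hg2 _ (pvBeesLeft_length cs 0 0), hg1 _ (pvBeesRight_length _ cs),
    pvBuildRight_getElem cs 0 k1 hk1 (k1 : Int) (by omega),
    pvBuildLeft_getElem cs 0 (-1) k2 hk2 (k2 : Int) (by omega),
    pvBeesLeft_getElem cs 0 0 0 k2 hk2 (k2 : Int) (by omega),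
    pvBeesRight_getElem _ cs 0 k1 hk1 (k1 : Int) (by omega), hT]
  simp only [Option.getD_some]
  cases hf1 : ((pvFlowers cs 0).filter (fun p => decide ((k1 : Int) ≤ p))).head? with
  | none =>
    cases hf2 : ((pvFlowers cs 0).filter (fun p => decide (p ≤ (k2 : Int)))).getLast? with
    | none =>
      have hs := pvStars_nonneg cs
      simp only [Option.getD_none, Option.elim_none]
      rw [if_neg (by intro h; exact h.1 rfl)]
      omega
    | some f2 =>
      have hc2 := pvCount_le_stars cs (f2 + 1 - 0).toNat
      simp only [Option.getD_none, Option.getD_some, Option.elim_none, Option.elim_some]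
      rw [if_neg (by intro h; exact h.1 rfl)]
      omega
  | some f1 =>
    have hm1 : f1 ∈ pvFlowers cs 0 :=
      List.mem_of_mem_filter (List.mem_of_mem_head? (Option.mem_def.mpr hf1))
    have hb1 : 0 ≤ f1 := pvFlowers_ge cs 0 f1 hm1
    have hl1 : f1 < (cs.length : Int) := by have := pvFlowers_lt cs 0 f1 hm1; omega
    cases hf2 : ((pvFlowers cs 0).filter (fun p => decide (p ≤ (k2 : Int)))).getLast? with
    | none =>
      have hc1 := pvCount_nonneg cs (f1 + 1 - 0).toNat
      simp only [Option.getD_none, Option.getD_some, Option.elim_none, Option.elim_some]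
      rw [if_neg (by intro h; exact h.2.1 rfl)]
      omega
    | some f2 =>
      have hm2 : f2 ∈ pvFlowers cs 0 :=
        List.mem_of_mem_filter (List.mem_reverse.mp (List.mem_of_mem_head?
          (Option.mem_def.mpr (by rw [List.head?_reverse]; exact hf2))))
      have hb2 : 0 ≤ f2 := pvFlowers_ge cs 0 f2 hm2
      have hl2 : f2 < (cs.length : Int) := by have := pvFlowers_lt cs 0 f2 hm2; omega
      simp only [Option.getD_some, Option.elim_some]
      rw [PySem.List.pyGet?_of_nonneg _ (by omega : (0:Int) ≤ f2 + 1),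
        PySem.List.pyGet?_of_nonneg _ (by omega : (0:Int) ≤ f1 + 1),
        pvBuildPrefix_getElem cs 0 (f2 + 1).toNat (by omega),
        pvBuildPrefix_getElem cs 0 (f1 + 1).toNat (by omega)]
      simp only [Option.getD_some]
      rw [show (f2 + 1 - 0).toNat = (f2 + 1).toNat by omega,
        show (f1 + 1 - 0).toNat = (f1 + 1).toNat by omega]
      by_cases hle : f1 ≤ f2
      · have hmono := pvCount_mono cs (f1 + 1).toNat (f2 + 1).toNat (by omega)
        rw [if_pos ⟨by omega, by omega, hle⟩]
        omega
      · have hmono := pvCount_mono cs (f2 + 1).toNat (f1 + 1).toNat (by omega)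
        rw [if_neg (fun h => hle h.2.2)]
        omega

-- the results loop, query by query
theorem pvLoop_eq (cs : List Char) (si ei : List Int) (hlen : si.length ≤ ei.length)
    (hq : ∀ q ∈ si.zip ei,
      1 - (cs.length : Int) ≤ q.1 ∧ q.1 ≤ (cs.length : Int) ∧
      1 - (cs.length : Int) ≤ q.2 ∧ q.2 ≤ (cs.length : Int)) :
    pvLoopA (pvBuildLeft cs 0 (-1)) (pvBuildRight cs 0) (pvBuildPrefix cs 0) si ei =
      pvLoopB (pvBeesLeft cs 0 0).1 (pvBeesRight (pvBeesLeft cs 0 0).2 cs).1 si ei := by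
  induction si generalizing ei with
  | nil => simp [pvLoopA, pvLoopB]
  | cons st sts ih =>
    cases ei with
    | nil => simp at hlen
    | cons en ens =>
      obtain ⟨hq1, hq2, hq3, hq4⟩ := hq (st, en) (by simp)
      simp only [pvLoopA, pvLoopB]
      refine congrArg₂ _ ?_ ?_
      · exact pvQuery_eq cs st en hq1 hq2 hq3 hq4
      · exact ih ens (by simpa using hlen)
          (fun q hq' => hq q (by rw [List.zip_cons_cons]; exact List.mem_cons_of_mem _ hq'))

-- ===== VERDICT (by name: the statement is the Claim_ definition above) =====
theorem count_bees_between_flowers_spec : Claim_equal_count_bees_between_flowers := by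
  intro s si ei _hdom hpre
  exact pvLoop_eq s.toList si ei hpre.1 hpre.2
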